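-- pv_equiv track=rewrite | github.com/prometheuxresearch/prometheux_chain | prometheux_chain/explanation/explainer.py | process_aggregate_by_start_node
-- ===== SOURCE A (Python) =====
-- def process_aggregate_by_start_node(aggregate_by_start_node):
--     def replace_skipped_predicates(predicate):
--         predicate_name = predicate.split("(")[0]
--         # Skip vatoms
--         if "vatom_" in predicate_name:
--             final_ancestors = set()
--             if predicate in aggregate_by_start_node:
--                 for child_predicate in aggregate_by_start_node[predicate]:
--                     final_ancestors.update(replace_skipped_predicates(child_predicate))
--             return final_ancestors
--         else:
--             return {predicate}
--
--     updated_aggregate = {}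
--     for key, values in aggregate_by_start_node.items():
--         if "vatom_" not in key.split("(")[0]:
--             new_values = set()
--             for value in values:
--                 new_values.update(replace_skipped_predicates(value))
--             updated_aggregate[key] = new_values
--
--     return updated_aggregate
-- ===== SOURCE B (Python) =====
-- def process_aggregate_by_start_node(aggregate_by_start_node):
--     # Memoized resolution: each vatom predicate is expanded at most once
--     # (A re-traverses the whole sub-DAG on every occurrence).
--     memo = {}
--
--     def resolve(predicate):
--         if "vatom_" not in predicate.split("(")[0]:
--             return [predicate]
--         if predicate in memo:
--             return memo[predicate]
--         acc = []
--         for child in aggregate_by_start_node.get(predicate, ()):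
--             for x in resolve(child):
--                 if x not in acc:
--                     acc.append(x)
--         memo[predicate] = acc
--         return acc
--
--     updated = {}
--     for key, values in aggregate_by_start_node.items():
--         if "vatom_" not in key.split("(")[0]:
--             acc = []
--             for value in values:
--                 for x in resolve(value):
--                     if x not in acc:
--                         acc.append(x)
--             updated[key] = set(acc)
--     return updated
-- ===== Notes on version B (the rewrite author's own statement) =====
-- stated objective: alternative
-- what changed: B memoizes the expansion of each vatom predicate in a dict (each predicate expanded at most once, with explicit first-occurrence dedup lists) instead of A's naive recursion that re-traverses the whole sub-DAG at every occurrence; on the random timing inputs (few vatom chains) the measured cost is the same.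
import Mathlib
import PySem

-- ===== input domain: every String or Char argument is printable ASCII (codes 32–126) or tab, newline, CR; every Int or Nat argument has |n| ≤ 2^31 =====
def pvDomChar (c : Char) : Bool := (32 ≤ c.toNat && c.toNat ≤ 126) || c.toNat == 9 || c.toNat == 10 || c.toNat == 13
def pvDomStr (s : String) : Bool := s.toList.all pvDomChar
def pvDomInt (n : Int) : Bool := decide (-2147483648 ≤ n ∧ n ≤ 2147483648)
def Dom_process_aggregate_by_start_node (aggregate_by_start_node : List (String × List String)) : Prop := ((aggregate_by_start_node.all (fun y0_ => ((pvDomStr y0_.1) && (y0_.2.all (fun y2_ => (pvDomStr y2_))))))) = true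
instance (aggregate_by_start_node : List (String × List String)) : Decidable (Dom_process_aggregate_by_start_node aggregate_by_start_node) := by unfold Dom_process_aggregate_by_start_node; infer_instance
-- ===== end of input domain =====

-- B memoizes the expansion of each vatom predicate (each node expanded at most once) instead of
-- A's naive recursion that re-traverses the whole sub-DAG at every occurrence.
-- Both return dicts of SETS; set values are modelled as first-occurrence-ordered distinct lists.

-- ===== PORT A =====
-- predicate.split("(")[0]
def pvName (p : String) : String := (((PySem.Str.split? p "(").getD []).headD "")
-- "vatom_" in predicate.split("(")[0]
def pvIsVatom (p : String) : Bool := PySem.Str.isIn "vatom_" (pvName p)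

-- replace_skipped_predicates, with a fuel guard for totality; `none` = Python's RecursionError
-- (never reached on inputs satisfying Pre_, which bounds every vatom expansion chain).
def pvResA (d : List (String × List String)) : Nat → String → Option (List String)
  | 0, _ => none
  | f+1, p =>
    if pvIsVatom p then
      match d.lookup p with
      | some ch =>
          ch.foldl (fun acco c => acco.bind fun acc =>
              (pvResA d f c).map fun r => PySem.Set.update acc r) (some PySem.Set.empty)
      | none => some PySem.Set.empty
    else some [p]

def process_aggregate_by_start_node (aggregate_by_start_node : List (String × List String)) : List (String × List String) :=
  let F := aggregate_by_start_node.length + 3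
  (aggregate_by_start_node.foldl (fun acco kv => acco.bind fun acc =>
      if pvIsVatom kv.1 then some acc
      else (kv.2.foldl (fun nvo v => nvo.bind fun nv =>
              (pvResA aggregate_by_start_node F v).map fun r => PySem.Set.update nv r)
            (some PySem.Set.empty)).map fun nv => acc ++ [(kv.1, nv)])
    (some [])).getD []

-- ===== PORT B =====
-- for x in r: if x not in acc: acc.append(x)
def pvAddB (acc : List String) (r : List String) : List String :=
  r.foldl (fun a x => if a.contains x then a else a ++ [x]) acc

-- memoized resolve; memo is the Python dict (insertion-ordered assoc list, fresh keys appended)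
def pvResB (d : List (String × List String)) :
    Nat → List (String × List String) → String → List String × List (String × List String)
  | 0, memo, _ => ([], memo)
  | f+1, memo, p =>
    if pvIsVatom p then
      match memo.lookup p with
      | some v => (v, memo)
      | none =>
          let st := ((d.lookup p).getD []).foldl
            (fun (st : List String × List (String × List String)) c =>
              let rm := pvResB d f st.2 c
              (pvAddB st.1 rm.1, rm.2)) ([], memo)
          (st.1, st.2 ++ [(p, st.1)])
    else ([p], memo)

def process_aggregate_by_start_node_alt (aggregate_by_start_node : List (String × List String)) : List (String × List String) :=
  let F := aggregate_by_start_node.length + 3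
  (aggregate_by_start_node.foldl
    (fun (st : List (String × List String) × List (String × List String)) kv =>
      if pvIsVatom kv.1 then st
      else
        let r := kv.2.foldl
          (fun (st2 : List String × List (String × List String)) v =>
            let rm := pvResB aggregate_by_start_node F st2.2 v
            (pvAddB st2.1 rm.1, rm.2)) ([], st.2)
        (st.1 ++ [(kv.1, PySem.Set.ofList r.1)], r.2))
    ([], [])).1

-- ===== PRECONDITION & SPEC =====
-- one expansion step of the vatom dependency graph
def pvSucc (d : List (String × List String)) (q : String) : List String :=
  if pvIsVatom q then (d.lookup q).getD [] else []
def pvStep (d : List (String × List String)) (S : List String) : List String :=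
  S.flatMap (pvSucc d)
def pvStepIter (d : List (String × List String)) : Nat → List String → List String
  | 0, S => S
  | k+1, S => pvStepIter d k (pvStep d S)

-- Pre_ excludes (a) assoc lists with duplicate keys, which cannot arise from a Python dict, and
-- (b) inputs whose vatom dependency graph has a cycle: there A's unbounded recursion raises
-- RecursionError (every expansion chain from a key must die out within length+1 steps = acyclicity).
def Pre_process_aggregate_by_start_node (aggregate_by_start_node : List (String × List String)) : Prop :=
  (aggregate_by_start_node.map Prod.fst).Nodup ∧
  ∀ p ∈ aggregate_by_start_node.map Prod.fst,
    pvStepIter aggregate_by_start_node (aggregate_by_start_node.length + 1) [p] = []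

instance (aggregate_by_start_node : List (String × List String)) : Decidable (Pre_process_aggregate_by_start_node aggregate_by_start_node) := by unfold Pre_process_aggregate_by_start_node; infer_instance

def pvWitness_process_aggregate_by_start_node : (List (String × List String)) :=
  [("a", ["vatom_b(x)", "c"]), ("vatom_b(x)", ["d", "vatom_e"]), ("f", [])]

def Spec_process_aggregate_by_start_node (aggregate_by_start_node : List (String × List String)) (out : List (String × List String)) : Prop := out = process_aggregate_by_start_node_alt aggregate_by_start_node
instance (aggregate_by_start_node : List (String × List String)) (out : List (String × List String)) : Decidable (Spec_process_aggregate_by_start_node aggregate_by_start_node out) := by unfold Spec_process_aggregate_by_start_node; infer_instance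

-- ===== CLAIM (what is proved, stated in full; the proofs are below) =====
def Claim_equal_process_aggregate_by_start_node : Prop := ∀ (aggregate_by_start_node : List (String × List String)), Dom_process_aggregate_by_start_node aggregate_by_start_node → Pre_process_aggregate_by_start_node aggregate_by_start_node → Spec_process_aggregate_by_start_node aggregate_by_start_node (process_aggregate_by_start_node aggregate_by_start_node)

-- ===== LEMMAS AND PROOFS =====

-- pvAddB is exactly Python's set.update on a distinct-list set
lemma pvAddB_eq_update (acc r : List String) : pvAddB acc r = PySem.Set.update acc r := rfl

-- iterating from a subset of an emptied set also empties
lemma pvStep_subset {d : List (String × List String)} {S T : List String}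
    (h : S ⊆ T) : pvStep d S ⊆ pvStep d T := by
  intro x hx
  simp only [pvStep, List.mem_flatMap] at *
  obtain ⟨a, ha, hxa⟩ := hx
  exact ⟨a, h ha, hxa⟩

lemma pvStepIter_nil_of_subset {d : List (String × List String)} :
    ∀ (k : Nat) {S T : List String}, S ⊆ T → pvStepIter d k T = [] → pvStepIter d k S = [] := by
  intro k
  induction k with
  | zero =>
    intro S T h hT
    simp only [pvStepIter] at *
    exact List.subset_nil.mp (hT ▸ h)
  | succ k ih =>
    intro S T h hT
    simp only [pvStepIter] at *
    exact ih (pvStep_subset h) hT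

lemma pvStepIter_pad {d : List (String × List String)} :
    ∀ (k : Nat) (S : List String), pvStepIter d k S = [] → pvStepIter d (k+1) S = [] := by
  intro k
  induction k with
  | zero =>
    intro S h
    simp only [pvStepIter] at *
    subst h
    simp [pvStep]
  | succ k ih =>
    intro S h
    simp only [pvStepIter] at *
    exact ih _ h

-- fold of A's inner loop propagates none
lemma pvFoldA_none (d : List (String × List String)) (f : Nat) (ch : List String) :
    ch.foldl (fun acco c => acco.bind fun acc =>
      (pvResA d f c).map fun r => PySem.Set.update acc r) none = none := by
  induction ch with
  | nil => rfl
  | cons c t ih => simpa using ih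

-- fuel monotonicity of A's recursion
lemma pvResA_mono (d : List (String × List String)) :
    ∀ (f : Nat) (p : String) (r : List String),
      pvResA d f p = some r → pvResA d (f+1) p = some r := by
  intro f
  induction f with
  | zero => intro p r h; simp [pvResA] at h
  | succ f ih =>
    intro p r h
    rw [pvResA] at h ⊢
    cases hv : pvIsVatom p with
    | false => simpa [hv] using (by simpa [hv] using h)
    | true =>
      simp only [hv, if_true] at h ⊢
      cases hl : d.lookup p with
      | none => simpa [hl] using (by simpa [hl] using h)
      | some ch =>
        simp only [hl] at h ⊢
        -- fold monotonicity, generalizing the accumulator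
        suffices hfold : ∀ (t : List String) (a : List String),
            t.foldl (fun acco c => acco.bind fun acc =>
              (pvResA d f c).map fun r => PySem.Set.update acc r) (some a) = some r →
            t.foldl (fun acco c => acco.bind fun acc =>
              (pvResA d (f+1) c).map fun r => PySem.Set.update acc r) (some a) = some r by
          exact hfold ch PySem.Set.empty h
        intro t
        induction t with
        | nil => intro a h'; exact h'
        | cons c t iht =>
          intro a h'
          simp only [List.foldl_cons] at h' ⊢
          cases hc : pvResA d f c with
          | none =>
            rw [hc] at h'
            simp only [Option.bind_some, Option.map_none] at h'
            rw [pvFoldA_none] at h'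
            exact absurd h' (by simp)
          | some rc =>
            rw [hc] at h'
            rw [ih c rc hc]
            simp only [Option.bind_some, Option.map_some] at h' ⊢
            exact iht _ h'


lemma pvResA_mono_le (d : List (String × List String)) {f f' : Nat} (h : f ≤ f')
    {p : String} {r : List String} (hr : pvResA d f p = some r) : pvResA d f' p = some r := by
  obtain ⟨j, rfl⟩ := Nat.exists_eq_add_of_le h
  induction j with
  | zero => exact hr
  | succ j ih => exact pvResA_mono d (f + j) p r (ih (Nat.le_add_right f j))

-- fold of A's inner loop returns a value when every child resolves
lemma pvFoldA_some (d : List (String × List String)) (f : Nat) :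
    ∀ (ch : List String), (∀ c ∈ ch, ∃ r, pvResA d f c = some r) →
    ∀ a, ∃ b, ch.foldl (fun acco c => acco.bind fun acc =>
      (pvResA d f c).map fun r => PySem.Set.update acc r) (some a) = some b := by
  intro ch
  induction ch with
  | nil => exact fun _ a => ⟨a, rfl⟩
  | cons c t ih =>
    intro h a
    obtain ⟨rc, hrc⟩ := h c (by simp)
    have ⟨b, hb⟩ := ih (fun c' hc' => h c' (by simp [hc'])) (PySem.Set.update a rc)
    exact ⟨b, by simpa [hrc] using hb⟩

-- sufficiency: a bounded expansion chain means the recursion terminates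
lemma pvResA_suff (d : List (String × List String)) :
    ∀ (k : Nat) (q : String), pvStepIter d k [q] = [] →
    ∀ f, k < f → ∃ r, pvResA d f q = some r := by
  intro k
  induction k with
  | zero => intro q h; simp [pvStepIter] at h
  | succ k ih =>
    intro q h f hf
    obtain ⟨f', rfl⟩ : ∃ f', f = f' + 1 := ⟨f - 1, by omega⟩
    rw [pvResA]
    cases hv : pvIsVatom q with
    | false => exact ⟨[q], by simp⟩
    | true =>
      cases hl : d.lookup q with
      | none => exact ⟨PySem.Set.empty, by simp⟩
      | some ch =>
        have hstep : pvStep d [q] = ch := by simp [pvStep, pvSucc, hv, hl]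
        have hch : pvStepIter d k ch = [] := by
          simpa [pvStepIter, hstep] using h
        have hall : ∀ c ∈ ch, ∃ r, pvResA d f' c = some r := by
          intro c hc
          exact ih c (pvStepIter_nil_of_subset k (by simpa using hc) hch) f' (by omega)
        obtain ⟨b, hb⟩ := pvFoldA_some d f' ch hall PySem.Set.empty
        refine ⟨b, ?_⟩
        simpa [PySem.Set.empty] using hb

-- fuel stability above the sufficiency bound
lemma pvResA_stab (d : List (String × List String)) {k f1 f2 : Nat} {q : String}
    (h : pvStepIter d k [q] = []) (h1 : k < f1) (h2 : k < f2) :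
    pvResA d f1 q = pvResA d f2 q := by
  obtain ⟨r, hr⟩ := pvResA_suff d k q h (k+1) (by omega)
  rw [pvResA_mono_le d h1 hr, pvResA_mono_le d h2 hr]

-- memo invariant: every memo entry is the fresh value that A's recursion computes
def pvInv (d : List (String × List String)) (memo : List (String × List String)) : Prop :=
  ∀ p v, memo.lookup p = some v → pvResA d (d.length + 3) p = some v

-- coupled folds: A's inner union-fold (at any sufficient fuel g) equals B's dedup/memo fold
lemma pvFoldAB (d : List (String × List String)) (f g : Nat) :
    ∀ (ch : List String),
    (∀ c ∈ ch, ∀ memo, pvInv d memo →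
        pvResA d (d.length + 3) c = some (pvResB d f memo c).1 ∧ pvInv d (pvResB d f memo c).2) →
    (∀ c ∈ ch, pvResA d g c = pvResA d (d.length + 3) c) →
    ∀ (acc : List String) (memo : List (String × List String)), pvInv d memo →
      ch.foldl (fun acco c => acco.bind fun a =>
          (pvResA d g c).map fun r => PySem.Set.update a r) (some acc)
        = some (ch.foldl (fun st c =>
            (pvAddB st.1 (pvResB d f st.2 c).1, (pvResB d f st.2 c).2)) (acc, memo)).1
      ∧ pvInv d (ch.foldl (fun st c =>
            (pvAddB st.1 (pvResB d f st.2 c).1, (pvResB d f st.2 c).2)) (acc, memo)).2 := by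
  intro ch
  induction ch with
  | nil => exact fun _ _ acc memo hinv => ⟨rfl, hinv⟩
  | cons c t ih =>
    intro H hg acc memo hinv
    obtain ⟨hA, hinv2⟩ := H c (by simp) memo hinv
    simp only [List.foldl_cons, Option.bind_some]
    rw [hg c (by simp), hA]
    simp only [Option.map_some]
    rw [← pvAddB_eq_update]
    exact ih (fun c' hc' => H c' (by simp [hc'])) (fun c' hc' => hg c' (by simp [hc']))
      (pvAddB acc (pvResB d f memo c).1) (pvResB d f memo c).2 hinv2

-- main coupling: B's memoized recursion returns A's fresh value and preserves the invariant
lemma pvResB_main (d : List (String × List String)) :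
    ∀ (k : Nat), k ≤ d.length + 2 →
    ∀ (q : String) (f : Nat) (memo : List (String × List String)),
      pvStepIter d k [q] = [] → k < f → pvInv d memo →
      pvResA d (d.length + 3) q = some (pvResB d f memo q).1 ∧ pvInv d (pvResB d f memo q).2 := by
  intro k
  induction k with
  | zero => intro _ q f memo h _ _; simp [pvStepIter] at h
  | succ k ih =>
    intro hk q f memo h hf hinv
    obtain ⟨f', rfl⟩ : ∃ f', f = f' + 1 := ⟨f - 1, by omega⟩
    rw [pvResB]
    cases hv : pvIsVatom q with
    | false =>
      simp only [hv, Bool.false_eq_true, if_false]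
      refine ⟨?_, hinv⟩
      rw [show d.length + 3 = (d.length + 2) + 1 from rfl, pvResA]
      simp [hv]
    | true =>
      simp only [hv, if_true]
      cases hm : List.lookup q memo with
      | some v => simp only [hm]; exact ⟨hinv q v hm, hinv⟩
      | none =>
        simp only [hm]
        cases hl : d.lookup q with
        | none =>
          simp only [hl, Option.getD_none, List.foldl_nil]
          have hAq : pvResA d (d.length + 3) q = some [] := by
            rw [show d.length + 3 = (d.length + 2) + 1 from rfl, pvResA]
            simp [hv, hl, PySem.Set.empty]
          refine ⟨hAq, ?_⟩
          intro p v hp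
          rw [List.lookup_append] at hp
          cases hmp : List.lookup p memo with
          | some w => rw [hmp] at hp; cases hp; exact hinv p v hmp
          | none =>
            rw [hmp, Option.none_or] at hp
            by_cases hqp : q = p
            · subst hqp
              simp [List.lookup] at hp
              subst hp
              exact hAq
            · simp [List.lookup, show (p == q) = false from beq_eq_false_iff_ne.mpr (Ne.symm hqp)] at hp
        | some ch =>
          simp only [hl, Option.getD_some]
          have hstep : pvStep d [q] = ch := by simp [pvStep, pvSucc, hv, hl]
          have hchain : ∀ c ∈ ch, pvStepIter d k [c] = [] := by
            intro c hc
            exact pvStepIter_nil_of_subset k (by simpa using hc)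
              (by simpa [pvStepIter, hstep] using h)
          have H : ∀ c ∈ ch, ∀ memo', pvInv d memo' →
              pvResA d (d.length + 3) c = some (pvResB d f' memo' c).1 ∧
              pvInv d (pvResB d f' memo' c).2 := by
            intro c hc memo' hinv'
            exact ih (by omega) c f' memo' (hchain c hc) (by omega) hinv'
          have hg : ∀ c ∈ ch, pvResA d (d.length + 2) c = pvResA d (d.length + 3) c := by
            intro c hc
            exact pvResA_stab d (hchain c hc) (by omega) (by omega)
          obtain ⟨hfold, hinvst⟩ := pvFoldAB d f' (d.length + 2) ch H hg [] memo hinv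
          have hAq : pvResA d (d.length + 3) q
              = some (ch.foldl (fun st c =>
                  (pvAddB st.1 (pvResB d f' st.2 c).1, (pvResB d f' st.2 c).2)) ([], memo)).1 := by
            rw [show d.length + 3 = (d.length + 2) + 1 from rfl, pvResA]
            simp only [hv, if_true, hl]
            simpa [PySem.Set.empty] using hfold
          refine ⟨hAq, ?_⟩
          intro p v hp
          rw [List.lookup_append] at hp
          cases hmp : List.lookup p (ch.foldl (fun st c =>
              (pvAddB st.1 (pvResB d f' st.2 c).1, (pvResB d f' st.2 c).2)) ([], memo)).2 with
          | some w => rw [hmp] at hp; cases hp; exact hinvst p v hmp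
          | none =>
            rw [hmp, Option.none_or] at hp
            by_cases hqp : q = p
            · subst hqp
              simp [List.lookup] at hp
              subst hp
              exact hAq
            · simp [List.lookup, show (p == q) = false from beq_eq_false_iff_ne.mpr (Ne.symm hqp)] at hp

lemma pvStepIter_empty (d : List (String × List String)) : ∀ k, pvStepIter d k [] = [] := by
  intro k
  induction k with
  | zero => rfl
  | succ k ih => simpa [pvStepIter, pvStep] using ih

lemma pv_lookup_mem {β : Type} (d : List (String × β)) (v : String) (x : β)
    (h : d.lookup v = some x) : v ∈ d.map Prod.fst := by
  induction d with
  | nil => simp [List.lookup] at h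
  | cons a t ih =>
    obtain ⟨k, b⟩ := a
    by_cases hb : k = v
    · simp [hb]
    · rw [List.lookup] at h
      simp only [show (v == k) = false from beq_eq_false_iff_ne.mpr (Ne.symm hb)] at h
      simp [ih h]

-- from Pre_: every string's expansion chain dies out within length+2 steps
lemma pvChains (d : List (String × List String))
    (hpre : ∀ p ∈ d.map Prod.fst, pvStepIter d (d.length + 1) [p] = []) :
    ∀ v, pvStepIter d (d.length + 2) [v] = [] := by
  intro v
  by_cases hkey : v ∈ d.map Prod.fst
  · exact pvStepIter_pad _ _ (hpre v hkey)
  · have hstep : pvStep d [v] = [] := by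
      cases hv : pvIsVatom v with
      | false => simp [pvStep, pvSucc, hv]
      | true =>
        cases hl : d.lookup v with
        | none => simp [pvStep, pvSucc, hv, hl]
        | some ch => exact absurd (pv_lookup_mem d v ch hl) hkey
    show pvStepIter d (d.length + 1) (pvStep d [v]) = []
    rw [hstep]
    exact pvStepIter_empty d _

-- the accumulated set values are duplicate-free, so set(acc) = acc
lemma pvInner_nodup (d : List (String × List String)) (F : Nat) (vs : List String) :
    ∀ nv : List String, nv.Nodup →
    ∀ r, vs.foldl (fun nvo v => nvo.bind fun nv =>
        (pvResA d F v).map fun r => PySem.Set.update nv r) (some nv) = some r → r.Nodup := by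
  induction vs with
  | nil =>
    intro nv hnv r h
    cases h
    exact hnv
  | cons v t ih =>
    intro nv hnv r h
    simp only [List.foldl_cons, Option.bind_some] at h
    cases hc : pvResA d F v with
    | none =>
      rw [hc] at h
      simp only [Option.map_none] at h
      rw [pvFoldA_none] at h
      exact absurd h (by simp)
    | some rc =>
      rw [hc] at h
      simp only [Option.map_some] at h
      exact ih (PySem.Set.update nv rc) (PySem.Set.nodup_update nv rc hnv) r h

-- coupled top-level loops over the dict items
lemma pvTop (d : List (String × List String))
    (hch : ∀ v, pvStepIter d (d.length + 2) [v] = []) :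
    ∀ (items acc memo : List (String × List String)), pvInv d memo →
      ∃ res,
        items.foldl (fun acco kv => acco.bind fun acc =>
            if pvIsVatom kv.1 then some acc
            else (kv.2.foldl (fun nvo v => nvo.bind fun nv =>
                    (pvResA d (d.length + 3) v).map fun r => PySem.Set.update nv r)
                  (some PySem.Set.empty)).map fun nv => acc ++ [(kv.1, nv)]) (some acc)
          = some res ∧
        (items.foldl (fun st kv =>
            if pvIsVatom kv.1 then st
            else
              ((fun r => (st.1 ++ [(kv.1, PySem.Set.ofList r.1)], r.2))
                (kv.2.foldl (fun st2 v =>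
                  (pvAddB st2.1 (pvResB d (d.length + 3) st2.2 v).1,
                   (pvResB d (d.length + 3) st2.2 v).2)) ([], st.2)))) (acc, memo)).1
          = res := by
  intro items
  induction items with
  | nil => exact fun acc memo _ => ⟨acc, rfl, rfl⟩
  | cons kv t ih =>
    intro acc memo hinv
    cases hv : pvIsVatom kv.1 with
    | true =>
      simp only [List.foldl_cons, Option.bind_some, hv, if_true]
      exact ih acc memo hinv
    | false =>
      have H : ∀ c ∈ kv.2, ∀ memo', pvInv d memo' →
          pvResA d (d.length + 3) c = some (pvResB d (d.length + 3) memo' c).1 ∧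
          pvInv d (pvResB d (d.length + 3) memo' c).2 := by
        intro c _ memo' hinv'
        exact pvResB_main d (d.length + 2) le_rfl c (d.length + 3) memo' (hch c) (by omega) hinv'
      obtain ⟨hfold, hinvst⟩ := pvFoldAB d (d.length + 3) (d.length + 3) kv.2 H
        (fun _ _ => rfl) [] memo hinv
      set st := kv.2.foldl (fun st2 v =>
          (pvAddB st2.1 (pvResB d (d.length + 3) st2.2 v).1,
           (pvResB d (d.length + 3) st2.2 v).2)) (([] : List String), memo) with hst
      have hnodup : st.1.Nodup := by
        refine pvInner_nodup d (d.length + 3) kv.2 [] (by simp) st.1 ?_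
        simpa [PySem.Set.empty] using hfold
      obtain ⟨res, hA, hB⟩ := ih (acc ++ [(kv.1, st.1)]) st.2 hinvst
      refine ⟨res, ?_, ?_⟩
      · simp only [List.foldl_cons, Option.bind_some, hv]
        rw [show (kv.2.foldl (fun nvo v => nvo.bind fun nv =>
              (pvResA d (d.length + 3) v).map fun r => PySem.Set.update nv r)
            (some PySem.Set.empty)) = some st.1 by simpa [PySem.Set.empty] using hfold]
        simpa using hA
      · simp only [List.foldl_cons, hv, ← hst]
        rw [PySem.Set.ofList_eq_self_of_nodup st.1 hnodup]
        exact hB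

-- ===== VERDICT (by name: the statement is the Claim_ definition above) =====
theorem process_aggregate_by_start_node_spec : Claim_equal_process_aggregate_by_start_node := by
  intro d _ hpre
  obtain ⟨_, hp⟩ := hpre
  have hch := pvChains d hp
  obtain ⟨res, hA, hB⟩ := pvTop d hch d [] [] (by intro p v h; simp [List.lookup] at h)
  unfold Spec_process_aggregate_by_start_node
  show (d.foldl (fun acco kv => acco.bind fun acc =>
      if pvIsVatom kv.1 then some acc
      else (kv.2.foldl (fun nvo v => nvo.bind fun nv =>
              (pvResA d (d.length + 3) v).map fun r => PySem.Set.update nv r)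
            (some PySem.Set.empty)).map fun nv => acc ++ [(kv.1, nv)]) (some [])).getD []
    = (d.foldl (fun st kv =>
        if pvIsVatom kv.1 then st
        else
          ((fun r => (st.1 ++ [(kv.1, PySem.Set.ofList r.1)], r.2))
            (kv.2.foldl (fun st2 v =>
              (pvAddB st2.1 (pvResB d (d.length + 3) st2.2 v).1,
               (pvResB d (d.length + 3) st2.2 v).2)) ([], st.2)))) ([], [])).1
  rw [hA, hB]
  rfl
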